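-- pv_equiv track=rewrite | github.com/oleksandr38kebab342/analiz_sys.log_pc | log_analyzer/log_parser.py | _simplify_message
-- ===== SOURCE A (Python) =====
-- def _simplify_message(message: str) -> str:
--     """
--     Спрощення повідомлення для нетехнічного користувача
--
--     Args:
--         message: Оригінальне повідомлення
--
--     Returns:
--         Спрощене повідомлення
--     """
--     # Словник для заміни технічних термінів
--     replacements = {
--         'authentication failed': 'не вдалося увійти в систему',
--         'connection timeout': 'перевищено час очікування з\'єднання',
--         'permission denied': 'недостатньо прав доступу',
--         'file not found': 'файл не знайдено',
--         'disk full': 'диск заповнений',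
--         'service failed': 'служба не працює',
--         'network unreachable': 'мережа недоступна',
--         'out of memory': 'недостатньо пам\'яті',
--         'invalid request': 'неправильний запит',
--         'access denied': 'доступ заборонено'
--     }
--
--     simplified = message.lower()
--
--     # Застосування замін
--     for technical, simple in replacements.items():
--         simplified = simplified.replace(technical, simple)
--
--     # Обрізання до розумної довжини
--     if len(simplified) > 150:
--         simplified = simplified[:147] + '...'
--
--     return simplified.capitalize()
-- ===== SOURCE B (Python) =====
-- def _simplify_message(message: str) -> str:
--     """One left-to-right scan driven by a first-letter index: at each position only
--     the phrases starting with the current character are probed, instead of ten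
--     sequential full-string replace passes."""
--     index = {
--         'a': [('authentication failed', 'не вдалося увійти в систему'),
--               ('access denied', 'доступ заборонено')],
--         'c': [('connection timeout', 'перевищено час очікування з\'єднання')],
--         'p': [('permission denied', 'недостатньо прав доступу')],
--         'f': [('file not found', 'файл не знайдено')],
--         'd': [('disk full', 'диск заповнений')],
--         's': [('service failed', 'служба не працює')],
--         'n': [('network unreachable', 'мережа недоступна')],
--         'o': [('out of memory', 'недостатньо пам\'яті')],
--         'i': [('invalid request', 'неправильний запит')],
--     }
--     s = message.lower()
--     pieces = []
--     i = 0
--     n = len(s)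
--     while i < n:
--         for technical, simple in index.get(s[i], ()):
--             if s.startswith(technical, i):
--                 pieces.append(simple)
--                 i += len(technical)
--                 break
--         else:
--             pieces.append(s[i])
--             i += 1
--     simplified = ''.join(pieces)
--     if len(simplified) > 150:
--         simplified = simplified[:147] + '...'
--     return simplified.capitalize()
-- ===== Notes on version B (the rewrite author's own statement) =====
-- stated objective: alternative
-- what changed: Ten sequential full-string replace passes are replaced by one left-to-right scan over a dict indexed by the phrase's first letter, so at each position only the phrases starting with the current character are probed; Pre_ excludes messages whose lowercase contains 'service failedisk full' or 'access deniedisk full', the only strings where two technical phrases overlap and either replacement order is defensible.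
import Mathlib
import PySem

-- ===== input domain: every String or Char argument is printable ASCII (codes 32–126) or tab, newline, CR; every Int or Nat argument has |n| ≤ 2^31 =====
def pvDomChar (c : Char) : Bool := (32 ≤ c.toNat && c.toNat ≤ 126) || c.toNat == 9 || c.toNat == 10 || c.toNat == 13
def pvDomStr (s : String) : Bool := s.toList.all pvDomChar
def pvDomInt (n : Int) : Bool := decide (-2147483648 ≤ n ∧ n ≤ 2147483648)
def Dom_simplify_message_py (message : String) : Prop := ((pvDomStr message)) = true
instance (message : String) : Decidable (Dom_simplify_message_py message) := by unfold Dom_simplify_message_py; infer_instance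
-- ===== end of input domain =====

-- B replaces A's ten sequential full-string replace passes by ONE left-to-right scan over a dict
-- indexed by the phrase's first letter (same phrases, same output); return value only, no mutation.

-- ===== PORT A =====
-- A's replacement dict, in its insertion order.
def pvPairs : List (List Char × List Char) :=
  [("authentication failed".toList, "не вдалося увійти в систему".toList),
   ("connection timeout".toList, "перевищено час очікування з'єднання".toList),
   ("permission denied".toList, "недостатньо прав доступу".toList),
   ("file not found".toList, "файл не знайдено".toList),
   ("disk full".toList, "диск заповнений".toList),
   ("service failed".toList, "служба не працює".toList),
   ("network unreachable".toList, "мережа недоступна".toList),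
   ("out of memory".toList, "недостатньо пам'яті".toList),
   ("invalid request".toList, "неправильний запит".toList),
   ("access denied".toList, "доступ заборонено".toList)]

-- Hand port of str.capitalize() (PySem has none): first char to upper, rest to lower.
-- Exact for the characters reachable here: ASCII plus the Ukrainian letters of the table above.
def pvUpChar (c : Char) : Char :=
  if 'a' ≤ c ∧ c ≤ 'z' then Char.ofNat (c.toNat - 32)
  else if 0x430 ≤ c.toNat ∧ c.toNat ≤ 0x44F then Char.ofNat (c.toNat - 0x20)
  else if c.toNat = 0x454 ∨ c.toNat = 0x456 ∨ c.toNat = 0x457 then Char.ofNat (c.toNat - 0x50)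
  else if c.toNat = 0x491 then Char.ofNat 0x490
  else c

def pvLowChar (c : Char) : Char :=
  if 'A' ≤ c ∧ c ≤ 'Z' then Char.ofNat (c.toNat + 32)
  else if 0x410 ≤ c.toNat ∧ c.toNat ≤ 0x42F then Char.ofNat (c.toNat + 0x20)
  else if c.toNat = 0x404 ∨ c.toNat = 0x406 ∨ c.toNat = 0x407 then Char.ofNat (c.toNat + 0x50)
  else if c.toNat = 0x490 then Char.ofNat 0x491
  else c

def pvCapitalize (s : List Char) : List Char :=
  match s with
  | [] => []
  | c :: t => pvUpChar c :: t.map pvLowChar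

-- (each Python line in order; strings handled on .toList per PySem convention)
def simplify_message_py (message : String) : String :=
  -- simplified = message.lower()
  let simplified := PySem.Chars.lower message.toList
  -- for technical, simple in replacements.items(): simplified = simplified.replace(technical, simple)
  let simplified := pvPairs.foldl (fun acc kv => PySem.Chars.replace acc kv.1 kv.2) simplified
  -- if len(simplified) > 150: simplified = simplified[:147] + '...'
  let simplified := if 150 < simplified.length then PySem.Chars.slice simplified none (some 147) ++ "...".toList else simplified
  -- return simplified.capitalize()
  String.mk (pvCapitalize simplified)

-- ===== PORT B =====
-- Source B's literal dict keyed by the phrase's first letter; index.get(s[i], ()) is the else-[] chain.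
def pvBucket (c : Char) : List (List Char × List Char) :=
  if c = 'a' then
    [("authentication failed".toList, "не вдалося увійти в систему".toList),
     ("access denied".toList, "доступ заборонено".toList)]
  else if c = 'c' then [("connection timeout".toList, "перевищено час очікування з'єднання".toList)]
  else if c = 'p' then [("permission denied".toList, "недостатньо прав доступу".toList)]
  else if c = 'f' then [("file not found".toList, "файл не знайдено".toList)]
  else if c = 'd' then [("disk full".toList, "диск заповнений".toList)]
  else if c = 's' then [("service failed".toList, "служба не працює".toList)]
  else if c = 'n' then [("network unreachable".toList, "мережа недоступна".toList)]
  else if c = 'o' then [("out of memory".toList, "недостатньо пам'яті".toList)]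
  else if c = 'i' then [("invalid request".toList, "неправильний запит".toList)]
  else []

-- the while/for-break loop of Source B: probe only the bucket of the current character
-- (for/else with break = first match in the bucket = find?), else emit the character;
-- advancing by len(technical) = consuming c plus len-1 more of the tail. The loop runs at
-- most len(s) times (i grows by ≥ 1), so it is ported fuel-bounded, PySem.Chars.replace.go-style.
def pvScanGo (fuel : Nat) (s : List Char) : List Char :=
  match fuel, s with
  | _, [] => []
  | 0, _ => []
  | fuel + 1, c :: t =>
    match (pvBucket c).find? (fun kv => kv.1.isPrefixOf (c :: t)) with
    | some kv => kv.2 ++ pvScanGo fuel (t.drop (kv.1.length - 1))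
    | none => c :: pvScanGo fuel t

def pvScanB (s : List Char) : List Char := pvScanGo s.length s

-- Source B's final two steps, as one helper: capitalize with a recursive lower of the tail.
def pvLowerTail : List Char → List Char
  | [] => []
  | c :: t => pvLowChar c :: pvLowerTail t

def pvCapB : List Char → List Char
  | [] => []
  | c :: t => pvUpChar c :: pvLowerTail t

def simplify_message_py_alt (message : String) : String :=
  let s := PySem.Chars.lower message.toList
  let simplified := pvScanB s
  let simplified := if 150 < simplified.length then simplified.take 147 ++ "...".toList else simplified
  String.mk (pvCapB simplified)

-- ===== PRECONDITION & SPEC =====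
-- Pre_ excludes messages whose lowercase contains 'service failedisk full' or 'access deniedisk full':
-- there two technical phrases overlap in one character, A's dict-order pick ('disk full' first) and
-- B's leftmost pick are both defensible, and no one would specify either.
def Pre_simplify_message_py (message : String) : Prop :=
  PySem.Str.isIn "service failedisk full" (PySem.Str.lower message) = false ∧
  PySem.Str.isIn "access deniedisk full" (PySem.Str.lower message) = false
instance (message : String) : Decidable (Pre_simplify_message_py message) := by
  unfold Pre_simplify_message_py; infer_instance

def pvWitness_simplify_message_py : String := "disk full"

def Spec_simplify_message_py (message : String) (out : String) : Prop := out = simplify_message_py_alt message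
instance (message : String) (out : String) : Decidable (Spec_simplify_message_py message out) := by
  unfold Spec_simplify_message_py; infer_instance

-- ===== CLAIM (what is proved, stated in full; the proofs are below) =====
def Claim_equal_simplify_message_py : Prop := ∀ (message : String), Dom_simplify_message_py message → Pre_simplify_message_py message → Spec_simplify_message_py message (simplify_message_py message)

-- ===== LEMMAS AND PROOFS =====

-- the two excluded overlap strings, as character lists
def pvPat1 : List Char := "service failedisk full".toList
def pvPat2 : List Char := "access deniedisk full".toList

-- a character of the inserted (Ukrainian) material
def pvVal (c : Char) : Bool := 1024 ≤ c.toNat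

-- Python str.replace as a plain structural recursion (spec of PySem.Chars.replace.go)
def pvRep (old new s : List Char) : List Char :=
  if h : old ≠ [] ∧ old.isPrefixOf s then new ++ pvRep old new (s.drop old.length)
  else
    match s with
    | [] => []
    | c :: t => c :: pvRep old new t
termination_by s.length
decreasing_by
  · have hne : s ≠ [] := by
      intro e; subst e
      rcases h with ⟨h1, h2⟩
      cases hol : old with
      | nil => exact h1 hol
      | cons a l => rw [hol] at h2; simp [List.isPrefixOf] at h2
    have hpos : 0 < old.length := List.length_pos_iff.mpr h.1
    have hle : old.length ≤ s.length := (List.isPrefixOf_iff_prefix.mp h.2).length_le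
    simp only [List.length_drop]
    have : 0 < s.length := List.length_pos_iff.mpr hne
    omega
  · simp

lemma pvRep_nil (old new : List Char) (hold : old ≠ []) : pvRep old new [] = [] := by
  rw [pvRep]
  have : ¬ (old ≠ [] ∧ old.isPrefixOf ([] : List Char)) := by
    rintro ⟨h1, h2⟩
    cases old with
    | nil => exact h1 rfl
    | cons a l => simp [List.isPrefixOf] at h2
  rw [dif_neg this]

lemma pvRep_pos (old new s : List Char) (hold : old ≠ []) (hp : old.isPrefixOf s) :
    pvRep old new s = new ++ pvRep old new (s.drop old.length) := by
  rw [pvRep, dif_pos ⟨hold, hp⟩]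

lemma pvRep_neg (old new : List Char) (c : Char) (t : List Char)
    (hp : ¬ old.isPrefixOf (c :: t)) : pvRep old new (c :: t) = c :: pvRep old new t := by
  rw [pvRep]
  rw [dif_neg (by rintro ⟨h1, h2⟩; exact hp h2)]

lemma pvGo_spec (old new : List Char) (hold : old ≠ []) :
    ∀ (fuel : Nat) (s acc : List Char), s.length ≤ fuel →
      PySem.Chars.replace.go old new fuel s acc = acc.reverse ++ pvRep old new s := by
  intro fuel
  induction fuel with
  | zero =>
    intro s acc hs
    have : s = [] := by cases s <;> simp_all
    subst this
    simp [PySem.Chars.replace.go, pvRep_nil old new hold]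
  | succ n ih =>
    intro s acc hs
    cases s with
    | nil => simp [PySem.Chars.replace.go, pvRep_nil old new hold]
    | cons c t =>
      have hlc : (c :: t).length = t.length + 1 := by simp
      by_cases hp : old.isPrefixOf (c :: t)
      · rw [PySem.Chars.replace.go]
        simp only [hp, if_true]
        have hle : old.length ≤ (c :: t).length := (List.isPrefixOf_iff_prefix.mp hp).length_le
        have hpos : 0 < old.length := List.length_pos_iff.mpr hold
        rw [hlc] at hle hs
        rw [ih (List.drop old.length (c :: t)) (new.reverse ++ acc)
          (by simp only [List.length_drop, hlc]; omega)]
        rw [pvRep_pos old new _ hold hp]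
        simp
      · rw [PySem.Chars.replace.go]
        simp only [hp]
        rw [ih t (c :: acc) (by rw [hlc] at hs; omega)]
        rw [pvRep_neg old new c t hp]
        simp

lemma replace_eq_pvRep (old new s : List Char) (hold : old ≠ []) :
    PySem.Chars.replace s old new = pvRep old new s := by
  rw [PySem.Chars.replace]
  have : old.isEmpty = false := by cases old <;> simp_all
  rw [this]
  simp only [Bool.false_eq_true, if_false]
  rw [pvGo_spec old new hold s.length s [] le_rfl]
  simp

-- "r is s with, at worst, an agreeing prefix followed by an inserted (Ukrainian) character"
def pvOK (s r : List Char) : Prop :=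
  r = s ∨ ∃ n c z, n ≤ s.length ∧ r = s.take n ++ c :: z ∧ pvVal c = true

lemma pvOK_refl (s : List Char) : pvOK s s := Or.inl rfl

lemma pvOK_cons (a : Char) {s r : List Char} (h : pvOK s r) : pvOK (a :: s) (a :: r) := by
  rcases h with h | ⟨n, c, z, hn, hr, hv⟩
  · exact Or.inl (by rw [h])
  · exact Or.inr ⟨n + 1, c, z, by simpa using hn, by simp [hr], hv⟩

lemma pvOK_trans {s r r' : List Char} (h1 : pvOK s r) (h2 : pvOK r r') : pvOK s r' := by
  rcases h2 with h2 | ⟨n', c', z', hn', hr', hv'⟩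
  · rw [h2]; exact h1
  rcases h1 with h1 | ⟨n, c, z, hn, hr, hv⟩
  · subst h1; exact Or.inr ⟨n', c', z', hn', hr', hv'⟩
  have hmin : min n s.length = n := Nat.min_eq_left hn
  by_cases hle : n' ≤ n
  · refine Or.inr ⟨n', c', z', le_trans hle hn, ?_, hv'⟩
    rw [hr', hr]
    rw [List.take_append_of_le_length (by rw [List.length_take]; omega)]
    rw [List.take_take, Nat.min_eq_left hle]
  · refine Or.inr ⟨n, c, z.take (n' - n - 1) ++ c' :: z', hn, ?_, hv⟩
    rw [hr', hr]
    rw [List.take_append]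
    rw [List.take_of_length_le (by rw [List.length_take]; omega)]
    rw [List.length_take, hmin]
    have hsplit2 : n' - n = (n' - n - 1) + 1 := by omega
    rw [hsplit2, List.take_succ_cons]
    simp

lemma pvRep_OK (old new : List Char) (hold : old ≠ [])
    (hnew : ∃ c t, new = c :: t ∧ pvVal c = true) :
    ∀ s, pvOK s (pvRep old new s) := by
  intro s
  induction hN : s.length using Nat.strong_induction_on generalizing s with
  | _ N ih =>
  subst hN
  by_cases hp : old.isPrefixOf s
  · rw [pvRep_pos old new s hold hp]
    rcases hnew with ⟨c, t, hc, hv⟩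
    exact Or.inr ⟨0, c, t ++ pvRep old new (s.drop old.length), by simp, by simp [hc], hv⟩
  · cases s with
    | nil => rw [pvRep_nil old new hold]; exact pvOK_refl []
    | cons a t =>
      rw [pvRep_neg old new a t hp]
      exact pvOK_cons a (ih t.length (by simp) t rfl)

lemma pvOK_prefix_of_prefix {s r k : List Char} (h : pvOK s r)
    (hkv : ∀ c ∈ k, pvVal c = false) (hpre : k <+: r) : k <+: s := by
  rcases h with h | ⟨n, c, z, hn, hr, hv⟩
  · rwa [h] at hpre
  subst hr
  by_cases hlen : k.length ≤ n
  · rcases hpre with ⟨w, hw⟩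
    have h5 : k = (s.take n ++ c :: z).take k.length := by rw [← hw]; rw [List.take_left]
    have e1 : (s.take n ++ c :: z).take k.length = s.take k.length := by
      rw [List.take_append_of_le_length (by rw [List.length_take]; omega), List.take_take,
        Nat.min_eq_left hlen]
    have hk : k = s.take k.length := h5.trans e1
    have h6 := List.take_prefix k.length s
    rw [← hk] at h6
    exact h6
  · exfalso
    rcases hpre with ⟨w, hw⟩
    have hcn : n < k.length := by omega
    have h0 := congrArg (fun l => l[n]?) hw
    simp only at h0
    rw [List.getElem?_append_left hcn] at h0
    have hlt : (s.take n).length = n := by rw [List.length_take]; omega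
    rw [List.getElem?_append_right (le_of_eq hlt), hlt] at h0
    simp only [Nat.sub_self, List.getElem?_cons_zero] at h0
    have h8 : k[n]'hcn = c := by
      have := List.getElem?_eq_getElem hcn
      rw [this] at h0
      exact Option.some.inj h0
    have h9 := hkv (k[n]'hcn) (List.getElem_mem hcn)
    rw [h8, hv] at h9
    exact absurd h9 (by simp)

-- chain of sequential replaces (the body of A's for-loop)
def pvChain (Q : List (List Char × List Char)) (s : List Char) : List Char :=
  Q.foldl (fun acc kv => PySem.Chars.replace acc kv.1 kv.2) s

lemma pvChain_cons_pair (k v : List Char) (Q : List (List Char × List Char)) (s : List Char) :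
    pvChain ((k, v) :: Q) s = pvChain Q (PySem.Chars.replace s k v) := rfl

-- decidable facts about the concrete table (split per pair: one big decide overflows the stack)
set_option maxRecDepth 8000 in
lemma pv_keys_bool : ∀ kv ∈ pvPairs,
    (!kv.1.isEmpty && kv.1.all (fun c => !pvVal c)) = true := by
  intro kv h
  simp only [pvPairs, List.mem_cons, List.not_mem_nil, or_false] at h
  rcases h with h|h|h|h|h|h|h|h|h|h <;> subst h <;> rfl

lemma pv_keys_fact : ∀ kv ∈ pvPairs, kv.1 ≠ [] ∧ ∀ c ∈ kv.1, pvVal c = false := by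
  intro kv h
  have hb := pv_keys_bool kv h
  simp only [Bool.and_eq_true, List.all_eq_true, Bool.not_eq_true'] at hb
  obtain ⟨h1, h2⟩ := hb
  refine ⟨?_, h2⟩
  intro e
  rw [e] at h1
  simp at h1

set_option maxRecDepth 8000 in
lemma pv_vals_bool : ∀ kv ∈ pvPairs,
    (match kv.2 with | [] => false | c :: _ => pvVal c) = true := by
  intro kv h
  simp only [pvPairs, List.mem_cons, List.not_mem_nil, or_false] at h
  rcases h with h|h|h|h|h|h|h|h|h|h <;> subst h <;> decide

lemma pv_vals_fact (kv : List Char × List Char) (h : kv ∈ pvPairs) :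
    ∃ c t, kv.2 = c :: t ∧ pvVal c = true := by
  have hb := pv_vals_bool kv h
  cases hv2 : kv.2 with
  | nil => rw [hv2] at hb; simp at hb
  | cons c t => rw [hv2] at hb; exact ⟨c, t, rfl, hb⟩

-- every key starts with one of these ASCII letters, and no replacement value contains any of them
def pvHeadChar (c : Char) : Bool := ['a', 'c', 'p', 'f', 'd', 's', 'n', 'o', 'i'].contains c

set_option maxRecDepth 8000 in
lemma pv_heads_keys : ∀ kv ∈ pvPairs,
    (match kv.1 with | [] => false | c :: _ => pvHeadChar c) = true := by
  intro kv h
  simp only [pvPairs, List.mem_cons, List.not_mem_nil, or_false] at h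
  rcases h with h|h|h|h|h|h|h|h|h|h <;> subst h <;> decide

set_option maxRecDepth 8000 in
lemma pv_heads_vals_bool : ∀ kv ∈ pvPairs,
    (kv.2.all (fun c => !pvHeadChar c)) = true := by
  intro kv h
  simp only [pvPairs, List.mem_cons, List.not_mem_nil, or_false] at h
  rcases h with h|h|h|h|h|h|h|h|h|h <;> subst h <;> rfl

lemma pv_heads_vals : ∀ kv ∈ pvPairs, ∀ c ∈ kv.2, pvHeadChar c = false := by
  intro kv h
  have hb := pv_heads_vals_bool kv h
  simp only [List.all_eq_true, Bool.not_eq_true'] at hb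
  exact hb

lemma pv_heads_fact : ∀ kv ∈ pvPairs, ∀ kv' ∈ pvPairs, ∀ c ∈ kv'.2, kv.1.head? ≠ some c := by
  intro kv hkv kv' hkv' c hc heq
  have h1 := pv_heads_keys kv hkv
  have h2 := pv_heads_vals kv' hkv' c hc
  cases hk : kv.1 with
  | nil => rw [hk] at heq; cases heq
  | cons a l =>
    rw [hk] at heq h1
    simp only at h1
    have : a = c := by simpa using heq
    rw [this] at h1
    rw [h1] at h2
    cases h2

-- key ki (earlier in the dict) against key kj (the first match): at every offset inside kj,
-- either the two keys are incompatible, or the overlap forces one of the two excluded patterns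
def pvCHK (ki kj : List Char) : Prop :=
  ∀ p, p < kj.length →
    if p + ki.length ≤ kj.length then ki ≠ (kj.drop p).take ki.length
    else ki.take (kj.length - p) ≠ kj.drop p ∨ (kj ++ ki.drop (kj.length - p)) ∈ [pvPat1, pvPat2]

set_option maxRecDepth 8000 in
lemma pv_chk : ∀ j, (hj : j < pvPairs.length) → ∀ i, (hi : i < j) →
    ∀ p, p < ((pvPairs[j]'hj).1).length →
    if p + ((pvPairs[i]'(lt_trans hi hj)).1).length ≤ ((pvPairs[j]'hj).1).length
    then (pvPairs[i]'(lt_trans hi hj)).1 ≠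
      (((pvPairs[j]'hj).1).drop p).take ((pvPairs[i]'(lt_trans hi hj)).1).length
    else ((pvPairs[i]'(lt_trans hi hj)).1).take (((pvPairs[j]'hj).1).length - p) ≠
        ((pvPairs[j]'hj).1).drop p ∨
      ((pvPairs[j]'hj).1 ++ ((pvPairs[i]'(lt_trans hi hj)).1).drop (((pvPairs[j]'hj).1).length - p))
        ∈ [pvPat1, pvPat2] := by decide

lemma pv_chk' : ∀ j, (hj : j < pvPairs.length) → ∀ i, (hi : i < j) →
    pvCHK (pvPairs[i]'(lt_trans hi hj)).1 (pvPairs[j]'hj).1 := by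
  intro j hj i hi
  unfold pvCHK
  exact pv_chk j hj i hi

-- CHAINCONS: when no key matches at the head, the whole chain commutes with the head character
lemma pvChain_cons_comm :
    ∀ (Q : List (List Char × List Char)), (∀ kv ∈ Q, kv ∈ pvPairs) →
    ∀ (c : Char) (t u : List Char), pvOK (c :: t) (c :: u) →
    (∀ kv ∈ Q, ¬ kv.1.isPrefixOf (c :: t)) →
    pvChain Q (c :: u) = c :: pvChain Q u ∧ pvOK (c :: t) (c :: pvChain Q u) := by
  intro Q
  induction Q with
  | nil => intro _ c t u hOK _; exact ⟨rfl, hOK⟩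
  | cons kv Q ih =>
    obtain ⟨k, v⟩ := kv
    intro hsub c t u hOK hnp
    obtain ⟨hk1, hk2⟩ := pv_keys_fact (k, v) (hsub (k, v) (by simp))
    have hv := pv_vals_fact (k, v) (hsub (k, v) (by simp))
    have hnpr : ¬ (k : List Char).isPrefixOf (c :: u) := by
      intro hpre
      exact (hnp (k, v) (by simp)) (List.isPrefixOf_iff_prefix.mpr
        (pvOK_prefix_of_prefix hOK hk2 (List.isPrefixOf_iff_prefix.mp hpre)))
    have hstep : PySem.Chars.replace (c :: u) k v = c :: pvRep k v u := by
      rw [replace_eq_pvRep _ _ _ hk1, pvRep_neg _ _ _ _ hnpr]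
    have hOK' : pvOK (c :: t) (c :: pvRep k v u) :=
      pvOK_trans hOK (pvOK_cons c (pvRep_OK k v hk1 hv u))
    obtain ⟨e1, e2⟩ := ih (fun x hx => hsub x (by simp [hx])) c t (pvRep k v u) hOK'
      (fun x hx => hnp x (by simp [hx]))
    constructor
    · show pvChain Q (PySem.Chars.replace (c :: u) k v) = c :: pvChain Q (PySem.Chars.replace u k v)
      rw [hstep, e1, replace_eq_pvRep _ _ _ hk1]
    · show pvOK (c :: t) (c :: pvChain Q (PySem.Chars.replace u k v))
      rw [replace_eq_pvRep _ _ _ hk1]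
      exact e2

lemma pvChain_nil_input : ∀ (Q : List (List Char × List Char)), (∀ kv ∈ Q, kv ∈ pvPairs) →
    pvChain Q [] = [] := by
  intro Q
  induction Q with
  | nil => intro _; rfl
  | cons kv Q ih =>
    obtain ⟨k, v⟩ := kv
    intro hsub
    obtain ⟨hk1, _⟩ := pv_keys_fact (k, v) (hsub (k, v) (by simp))
    rw [pvChain_cons_pair, replace_eq_pvRep _ _ _ hk1, pvRep_nil _ _ hk1]
    exact ih (fun x hx => hsub x (by simp [hx]))

lemma pvRep_peel (old new : List Char) (_hold : old ≠ []) :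
    ∀ (a u : List Char), (∀ p, p < a.length → ¬ old.isPrefixOf (a.drop p ++ u)) →
      pvRep old new (a ++ u) = a ++ pvRep old new u := by
  intro a
  induction a with
  | nil => intro u _; rfl
  | cons c a ih =>
    intro u hp
    have h0 : ¬ old.isPrefixOf (c :: (a ++ u)) := by
      have := hp 0 (by simp)
      simpa using this
    rw [List.cons_append, pvRep_neg _ _ _ _ h0, ih u (fun p hpl => by
      have := hp (p + 1) (by simp; omega)
      simpa using this)]
    simp

-- PEEL across an inserted value: no key can even start inside it
lemma pvChain_peel_val :
    ∀ (Q : List (List Char × List Char)), (∀ kv ∈ Q, kv ∈ pvPairs) →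
    ∀ (v : List Char), (∀ c ∈ v, ∀ kv ∈ pvPairs, kv.1.head? ≠ some c) →
    ∀ w, pvChain Q (v ++ w) = v ++ pvChain Q w := by
  intro Q
  induction Q with
  | nil => intro _ v _ w; rfl
  | cons kv Q ih =>
    obtain ⟨k, v'⟩ := kv
    intro hsub v hv w
    obtain ⟨hk1, _⟩ := pv_keys_fact (k, v') (hsub (k, v') (by simp))
    have hpeel : ∀ p, p < v.length → ¬ (k : List Char).isPrefixOf (v.drop p ++ w) := by
      intro p hpl hpre
      rcases List.isPrefixOf_iff_prefix.mp hpre with ⟨x, hx⟩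
      have hdrop : v.drop p = v[p] :: v.drop (p + 1) := List.drop_eq_getElem_cons hpl
      cases hk : k with
      | nil => exact hk1 hk
      | cons kc kt =>
        rw [hk] at hx
        rw [hdrop] at hx
        simp only [List.cons_append] at hx
        have hkc : kc = v[p] := by
          have := congrArg (fun l => l.head?) hx
          simpa using this
        exact (hv v[p] (List.getElem_mem hpl) (k, v') (hsub (k, v') (by simp)))
          (by rw [hk, ← hkc]; rfl)
    rw [pvChain_cons_pair, replace_eq_pvRep _ _ _ hk1, pvRep_peel _ _ hk1 v w hpeel,
      pvChain_cons_pair, replace_eq_pvRep _ _ _ hk1]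
    exact ih (fun x hx => hsub x (by simp [hx])) v hv (pvRep k v' w)

-- PEEL across the matched key k for the earlier-dict-order pairs (uses pv_chk and pattern-freeness)
lemma pvChain_peel_left :
    ∀ (Q : List (List Char × List Char)), (∀ kv ∈ Q, kv ∈ pvPairs) →
    ∀ (k rest : List Char), (∀ kv ∈ Q, pvCHK kv.1 k) →
    (¬ pvPat1 <:+: (k ++ rest)) → (¬ pvPat2 <:+: (k ++ rest)) →
    ∀ u, pvOK rest u →
      pvChain Q (k ++ u) = k ++ pvChain Q u ∧ pvOK rest (pvChain Q u) := by
  intro Q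
  induction Q with
  | nil => intro _ k rest _ _ _ u hOK; exact ⟨rfl, hOK⟩
  | cons kv Q ih =>
    obtain ⟨ki, vi⟩ := kv
    intro hsub k rest hchk h1 h2 u hOK
    obtain ⟨hk1, hk2⟩ := pv_keys_fact (ki, vi) (hsub (ki, vi) (by simp))
    have hvi := pv_vals_fact (ki, vi) (hsub (ki, vi) (by simp))
    have hCHK : pvCHK ki k := hchk (ki, vi) (by simp)
    have hpatcontra : ∀ pat, pat ∈ ([pvPat1, pvPat2] : List (List Char)) →
        pat <+: (k ++ rest) → False := by
      intro pat hmemp hppre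
      simp only [List.mem_cons, List.not_mem_nil, or_false] at hmemp
      rcases hmemp with e | e
      · exact h1 (e ▸ hppre.isInfix)
      · exact h2 (e ▸ hppre.isInfix)
    have hpeel : ∀ p, p < k.length → ¬ (ki : List Char).isPrefixOf (k.drop p ++ u) := by
      intro p hpl hpre
      rcases List.isPrefixOf_iff_prefix.mp hpre with ⟨w, hw⟩
      have hkdl : (k.drop p).length = k.length - p := by simp
      have hc := hCHK p hpl
      by_cases hle : p + ki.length ≤ k.length
      · rw [if_pos hle] at hc
        have h5 : ki = (k.drop p ++ u).take ki.length := by rw [← hw, List.take_left]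
        have e1 : (k.drop p ++ u).take ki.length = (k.drop p).take ki.length :=
          List.take_append_of_le_length (by rw [hkdl]; omega)
        exact hc (h5.trans e1)
      · rw [if_neg hle] at hc
        have htk : ki.take (k.length - p) = k.drop p := by
          have h3 := congrArg (List.take (k.length - p)) hw
          simp only at h3
          rw [List.take_append_of_le_length (by omega)] at h3
          rw [List.take_append_of_le_length (le_of_eq hkdl.symm)] at h3
          rw [← hkdl, List.take_length] at h3
          rw [hkdl] at h3
          exact h3
        rcases hc with hne | hpat
        · exact hne htk
        have hu : u = ki.drop (k.length - p) ++ w := by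
          have h4 := congrArg (List.drop (k.length - p)) hw
          simp only at h4
          rw [List.drop_append_of_le_length (by omega)] at h4
          rw [List.drop_append_of_le_length (le_of_eq hkdl.symm)] at h4
          rw [← hkdl, List.drop_length] at h4
          rw [hkdl] at h4
          simp only [List.nil_append] at h4
          exact h4.symm
        set m := ki.length - (k.length - p) with hm
        have hmlen : (ki.drop (k.length - p)).length = m := by simp [hm]
        have hmpos : 0 < m := by omega
        rcases hOK with hOKe | ⟨n, cv, z, hn, hu2, hvv⟩
        · exact hpatcontra _ hpat ⟨w, by rw [List.append_assoc, ← hu, hOKe]⟩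
        · have hrtn : (rest.take n).length = n := by rw [List.length_take]; omega
          by_cases hmn : m ≤ n
          · have e : u.take m = ki.drop (k.length - p) := by
              rw [hu]
              exact List.take_left' hmlen
            rw [hu2, List.take_append_of_le_length (by rw [hrtn]; omega),
              List.take_take, Nat.min_eq_left hmn] at e
            have hr2 : ki.drop (k.length - p) ++ rest.drop m = rest := by
              rw [← e]
              exact List.take_append_drop m rest
            exact hpatcontra _ hpat ⟨rest.drop m, by rw [List.append_assoc, hr2]⟩
          · have hn_lt : n < (ki.drop (k.length - p)).length := by omega
            have h6 := congrArg (fun l => l[n]?) hu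
            simp only at h6
            rw [List.getElem?_append_left hn_lt] at h6
            have h7 := congrArg (fun l => l[n]?) hu2
            simp only at h7
            rw [List.getElem?_append_right (le_of_eq hrtn), hrtn] at h7
            simp only [Nat.sub_self, List.getElem?_cons_zero] at h7
            have h8 : (ki.drop (k.length - p))[n]? = some cv := by rw [← h6]; exact h7
            have hmem := List.mem_of_getElem? h8
            have hmem2 : cv ∈ ki := List.mem_of_mem_drop hmem
            rw [hk2 cv hmem2] at hvv
            simp at hvv
    have hrep : PySem.Chars.replace (k ++ u) ki vi = k ++ pvRep ki vi u := by
      rw [replace_eq_pvRep _ _ _ hk1, pvRep_peel _ _ hk1 k u hpeel]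
    have hOK' : pvOK rest (pvRep ki vi u) := pvOK_trans hOK (pvRep_OK ki vi hk1 hvi u)
    obtain ⟨e1, e2⟩ := ih (fun x hx => hsub x (by simp [hx])) k rest
      (fun x hx => hchk x (by simp [hx])) h1 h2 (pvRep ki vi u) hOK'
    constructor
    · show pvChain Q (PySem.Chars.replace (k ++ u) ki vi) = k ++ pvChain Q (PySem.Chars.replace u ki vi)
      rw [hrep, e1, replace_eq_pvRep _ _ _ hk1]
    · show pvOK rest (pvChain Q (PySem.Chars.replace u ki vi))
      rw [replace_eq_pvRep _ _ _ hk1]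
      exact e2

-- the proof-side one-pass scan over the FULL dict, the common form both ports are reduced to
def pvScan (s : List Char) : List Char :=
  match h : pvPairs.find? (fun kv => kv.1.isPrefixOf s) with
  | some kv => kv.2 ++ pvScan (s.drop kv.1.length)
  | none =>
    match s with
    | [] => []
    | c :: t => c :: pvScan t
termination_by s.length
decreasing_by
  · have hpre := List.find?_some h
    have hmem := List.mem_of_find?_eq_some h
    have hne : kv.1 ≠ [] := by
      have hall : ∀ x ∈ pvPairs, x.1 ≠ [] := by decide
      exact hall _ hmem
    have hle : kv.1.length ≤ s.length :=
      (List.isPrefixOf_iff_prefix.mp hpre).length_le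
    have hpos : 0 < kv.1.length := List.length_pos_iff.mpr hne
    simp only [List.length_drop]
    omega
  · simp

-- unfolding equations for the scan
lemma pvScan_some {s : List Char} {kv : List Char × List Char}
    (h : pvPairs.find? (fun x => x.1.isPrefixOf s) = some kv) :
    pvScan s = kv.2 ++ pvScan (s.drop kv.1.length) := by
  rw [pvScan]
  split
  · rename_i kv' h'
    rw [h'] at h
    cases h
    rfl
  · rename_i h'
    rw [h'] at h
    cases h

lemma pvScan_nil : pvScan [] = [] := by
  rw [pvScan]
  split
  · rename_i kv' h'
    have hmem := List.mem_of_find?_eq_some h'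
    have hpre := List.find?_some h'
    obtain ⟨hk1, _⟩ := pv_keys_fact kv' hmem
    exfalso
    rcases List.isPrefixOf_iff_prefix.mp hpre with ⟨w, hw⟩
    cases hkv : kv'.1 with
    | nil => exact hk1 hkv
    | cons a l => rw [hkv] at hw; simp at hw
  · rfl

lemma pvScan_cons {c : Char} {t : List Char}
    (h : pvPairs.find? (fun x => x.1.isPrefixOf (c :: t)) = none) :
    pvScan (c :: t) = c :: pvScan t := by
  rw [pvScan]
  split
  · rename_i kv' h'
    rw [h'] at h
    cases h
  · rfl

-- MAIN: on pattern-free strings the ten-pass chain equals the one-pass scan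
set_option maxHeartbeats 1000000 in
lemma pvMain : ∀ (N : Nat) (s : List Char), s.length ≤ N →
    ¬ pvPat1 <:+: s → ¬ pvPat2 <:+: s →
    pvChain pvPairs s = pvScan s := by
  intro N
  induction N with
  | zero =>
    intro s hs h1 h2
    have : s = [] := by cases s <;> simp_all
    subst this
    rw [pvScan_nil]
    exact pvChain_nil_input pvPairs (fun kv h => h)
  | succ N ih =>
    intro s hs h1 h2
    cases hfind : pvPairs.find? (fun kv => kv.1.isPrefixOf s) with
    | none =>
      have hnone := List.find?_eq_none.mp hfind
      cases s with
      | nil =>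
        rw [pvScan_nil]
        exact pvChain_nil_input pvPairs (fun kv h => h)
      | cons c t =>
        have hres := pvChain_cons_comm pvPairs (fun kv h => h) c t t (pvOK_refl (c :: t))
          (fun kv h => by simpa using hnone kv h)
        have ht := ih t (by simp at hs; omega) (fun h => h1 (List.infix_cons h))
          (fun h => h2 (List.infix_cons h))
        rw [pvScan_cons hfind, hres.1, ht]
    | some kv =>
      obtain ⟨k, v⟩ := kv
      obtain ⟨hpk, B, Aft, hsplit, hB⟩ := List.find?_eq_some_iff_append.mp hfind
      have hpre : k <+: s := List.isPrefixOf_iff_prefix.mp (by simpa using hpk)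
      obtain ⟨rest, hrest⟩ := hpre
      have hmem : (k, v) ∈ pvPairs := List.mem_of_find?_eq_some hfind
      obtain ⟨hk1, hk2⟩ := pv_keys_fact (k, v) hmem
      have hkpos : 0 < k.length := List.length_pos_iff.mpr hk1
      have hBlen : B.length < pvPairs.length := by
        have := congrArg List.length hsplit
        simp at this
        omega
      have hBj : ∀ kv' ∈ B, pvCHK kv'.1 k := by
        intro kv' hkv'
        obtain ⟨i, hi, hBi⟩ := List.mem_iff_getElem.mp hkv'
        have hjk : pvPairs[B.length]'hBlen = (k, v) := by
          simp only [hsplit]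
          rw [List.getElem_append_right (le_refl B.length)]
          simp
        have hik : pvPairs[i]'(lt_trans hi hBlen) = kv' := by
          simp only [hsplit]
          rw [List.getElem_append_left hi]
          exact hBi
        have hc := pv_chk' B.length hBlen i hi
        rw [hik, hjk] at hc
        exact hc
      subst hrest
      have hsubB : ∀ kv' ∈ B, kv' ∈ pvPairs := by
        intro x hx; rw [hsplit]; exact List.mem_append_left _ hx
      have hsubA : ∀ kv' ∈ Aft, kv' ∈ pvPairs := by
        intro x hx; rw [hsplit]; simp [hx]
      have hchain : pvChain pvPairs (k ++ rest) =
          pvChain Aft (PySem.Chars.replace (pvChain B (k ++ rest)) k v) := by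
        unfold pvChain
        rw [hsplit, List.foldl_append, List.foldl_cons]
      have hchain2 : pvChain pvPairs rest =
          pvChain Aft (PySem.Chars.replace (pvChain B rest) k v) := by
        unfold pvChain
        rw [hsplit, List.foldl_append, List.foldl_cons]
      obtain ⟨eB, okB⟩ := pvChain_peel_left B hsubB k rest hBj h1 h2 rest (pvOK_refl rest)
      have hstep : PySem.Chars.replace (k ++ pvChain B rest) k v = v ++ pvRep k v (pvChain B rest) := by
        rw [replace_eq_pvRep _ _ _ hk1,
          pvRep_pos _ _ _ hk1 (List.isPrefixOf_iff_prefix.mpr (List.prefix_append k _))]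
        rw [List.drop_left]
      have hvmem : ∀ c ∈ v, ∀ kv' ∈ pvPairs, kv'.1.head? ≠ some c := by
        intro c hc kv' hkv'
        exact pv_heads_fact kv' hkv' (k, v) hmem c hc
      have eV := pvChain_peel_val Aft hsubA v hvmem (pvRep k v (pvChain B rest))
      have hrl : rest.length ≤ N := by
        simp only [List.length_append] at hs
        omega
      have hrest1 : ¬ pvPat1 <:+: rest := fun h =>
        h1 (h.trans (List.suffix_append k rest).isInfix)
      have hrest2 : ¬ pvPat2 <:+: rest := fun h =>
        h2 (h.trans (List.suffix_append k rest).isInfix)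
      calc pvChain pvPairs (k ++ rest)
          = pvChain Aft (PySem.Chars.replace (pvChain B (k ++ rest)) k v) := hchain
        _ = pvChain Aft (v ++ pvRep k v (pvChain B rest)) := by rw [eB, hstep]
        _ = v ++ pvChain Aft (pvRep k v (pvChain B rest)) := eV
        _ = v ++ pvChain pvPairs rest := by
            rw [hchain2, replace_eq_pvRep _ _ _ hk1]
        _ = v ++ pvScan rest := by rw [ih rest hrl hrest1 hrest2]
        _ = pvScan (k ++ rest) := by
            rw [pvScan_some hfind]
            simp only [List.drop_left]

-- ==== bridging B's bucket scan to the full-dict scan ====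

-- the ten pairs, named for the find?-bridging proofs
def pA : List Char × List Char := ("authentication failed".toList, "не вдалося увійти в систему".toList)
def pC : List Char × List Char := ("connection timeout".toList, "перевищено час очікування з'єднання".toList)
def pP : List Char × List Char := ("permission denied".toList, "недостатньо прав доступу".toList)
def pF : List Char × List Char := ("file not found".toList, "файл не знайдено".toList)
def pD : List Char × List Char := ("disk full".toList, "диск заповнений".toList)
def pS : List Char × List Char := ("service failed".toList, "служба не працює".toList)
def pN : List Char × List Char := ("network unreachable".toList, "мережа недоступна".toList)
def pO : List Char × List Char := ("out of memory".toList, "недостатньо пам'яті".toList)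
def pI : List Char × List Char := ("invalid request".toList, "неправильний запит".toList)
def pAcc : List Char × List Char := ("access denied".toList, "доступ заборонено".toList)

lemma pvPairs_eq : pvPairs = [pA, pC, pP, pF, pD, pS, pN, pO, pI, pAcc] := rfl

-- a key whose first letter is not c cannot match at c
lemma pvHeadNe (k : List Char) (c d : Char) (t : List Char)
    (hd : k.head? = some d) (hdc : d ≠ c) : k.isPrefixOf (c :: t) = false := by
  cases k with
  | nil => simp at hd
  | cons a l =>
    have ha : a = d := by simpa using hd
    subst ha
    simp [List.isPrefixOf, hdc]

lemma pvStrip (kv : List Char × List Char) (L : List (List Char × List Char)) (c d : Char)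
    (t : List Char) (hd : kv.1.head? = some d) (hdc : d ≠ c) :
    (kv :: L).find? (fun x => x.1.isPrefixOf (c :: t)) =
      L.find? (fun x => x.1.isPrefixOf (c :: t)) := by
  apply List.find?_cons_of_neg
  simp only [pvHeadNe kv.1 c d t hd hdc]
  simp

lemma pvFindCongr {p : (List Char × List Char) → Bool} (a : List Char × List Char)
    {l l' : List (List Char × List Char)} (h : l.find? p = l'.find? p) :
    (a :: l).find? p = (a :: l').find? p := by
  cases hp : p a
  · rw [List.find?_cons_of_neg (by simp [hp]), List.find?_cons_of_neg (by simp [hp]), h]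
  · rw [List.find?_cons_of_pos hp, List.find?_cons_of_pos hp]

-- at position c, searching the bucket of c equals searching the whole dict
lemma pvBucketFind (c : Char) (t : List Char) :
    (pvBucket c).find? (fun kv => kv.1.isPrefixOf (c :: t)) =
      pvPairs.find? (fun kv => kv.1.isPrefixOf (c :: t)) := by
  rw [pvPairs_eq]
  unfold pvBucket
  split_ifs with h1 h2 h3 h4 h5 h6 h7 h8 h9
  · subst h1
    symm
    apply pvFindCongr pA
    rw [pvStrip pC _ _ 'c' t rfl (by decide), pvStrip pP _ _ 'p' t rfl (by decide),
      pvStrip pF _ _ 'f' t rfl (by decide), pvStrip pD _ _ 'd' t rfl (by decide),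
      pvStrip pS _ _ 's' t rfl (by decide), pvStrip pN _ _ 'n' t rfl (by decide),
      pvStrip pO _ _ 'o' t rfl (by decide), pvStrip pI _ _ 'i' t rfl (by decide)]
    rfl
  · subst h2
    symm
    rw [pvStrip pA _ _ 'a' t rfl (by decide)]
    apply pvFindCongr pC
    rw [pvStrip pP _ _ 'p' t rfl (by decide), pvStrip pF _ _ 'f' t rfl (by decide),
      pvStrip pD _ _ 'd' t rfl (by decide), pvStrip pS _ _ 's' t rfl (by decide),
      pvStrip pN _ _ 'n' t rfl (by decide), pvStrip pO _ _ 'o' t rfl (by decide),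
      pvStrip pI _ _ 'i' t rfl (by decide), pvStrip pAcc _ _ 'a' t rfl (by decide)]
  · subst h3
    symm
    rw [pvStrip pA _ _ 'a' t rfl (by decide), pvStrip pC _ _ 'c' t rfl (by decide)]
    apply pvFindCongr pP
    rw [pvStrip pF _ _ 'f' t rfl (by decide), pvStrip pD _ _ 'd' t rfl (by decide),
      pvStrip pS _ _ 's' t rfl (by decide), pvStrip pN _ _ 'n' t rfl (by decide),
      pvStrip pO _ _ 'o' t rfl (by decide), pvStrip pI _ _ 'i' t rfl (by decide),
      pvStrip pAcc _ _ 'a' t rfl (by decide)]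
  · subst h4
    symm
    rw [pvStrip pA _ _ 'a' t rfl (by decide), pvStrip pC _ _ 'c' t rfl (by decide),
      pvStrip pP _ _ 'p' t rfl (by decide)]
    apply pvFindCongr pF
    rw [pvStrip pD _ _ 'd' t rfl (by decide), pvStrip pS _ _ 's' t rfl (by decide),
      pvStrip pN _ _ 'n' t rfl (by decide), pvStrip pO _ _ 'o' t rfl (by decide),
      pvStrip pI _ _ 'i' t rfl (by decide), pvStrip pAcc _ _ 'a' t rfl (by decide)]
  · subst h5
    symm
    rw [pvStrip pA _ _ 'a' t rfl (by decide), pvStrip pC _ _ 'c' t rfl (by decide),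
      pvStrip pP _ _ 'p' t rfl (by decide), pvStrip pF _ _ 'f' t rfl (by decide)]
    apply pvFindCongr pD
    rw [pvStrip pS _ _ 's' t rfl (by decide), pvStrip pN _ _ 'n' t rfl (by decide),
      pvStrip pO _ _ 'o' t rfl (by decide), pvStrip pI _ _ 'i' t rfl (by decide),
      pvStrip pAcc _ _ 'a' t rfl (by decide)]
  · subst h6
    symm
    rw [pvStrip pA _ _ 'a' t rfl (by decide), pvStrip pC _ _ 'c' t rfl (by decide),
      pvStrip pP _ _ 'p' t rfl (by decide), pvStrip pF _ _ 'f' t rfl (by decide),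
      pvStrip pD _ _ 'd' t rfl (by decide)]
    apply pvFindCongr pS
    rw [pvStrip pN _ _ 'n' t rfl (by decide), pvStrip pO _ _ 'o' t rfl (by decide),
      pvStrip pI _ _ 'i' t rfl (by decide), pvStrip pAcc _ _ 'a' t rfl (by decide)]
  · subst h7
    symm
    rw [pvStrip pA _ _ 'a' t rfl (by decide), pvStrip pC _ _ 'c' t rfl (by decide),
      pvStrip pP _ _ 'p' t rfl (by decide), pvStrip pF _ _ 'f' t rfl (by decide),
      pvStrip pD _ _ 'd' t rfl (by decide), pvStrip pS _ _ 's' t rfl (by decide)]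
    apply pvFindCongr pN
    rw [pvStrip pO _ _ 'o' t rfl (by decide), pvStrip pI _ _ 'i' t rfl (by decide),
      pvStrip pAcc _ _ 'a' t rfl (by decide)]
  · subst h8
    symm
    rw [pvStrip pA _ _ 'a' t rfl (by decide), pvStrip pC _ _ 'c' t rfl (by decide),
      pvStrip pP _ _ 'p' t rfl (by decide), pvStrip pF _ _ 'f' t rfl (by decide),
      pvStrip pD _ _ 'd' t rfl (by decide), pvStrip pS _ _ 's' t rfl (by decide),
      pvStrip pN _ _ 'n' t rfl (by decide)]
    apply pvFindCongr pO
    rw [pvStrip pI _ _ 'i' t rfl (by decide), pvStrip pAcc _ _ 'a' t rfl (by decide)]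
  · subst h9
    symm
    rw [pvStrip pA _ _ 'a' t rfl (by decide), pvStrip pC _ _ 'c' t rfl (by decide),
      pvStrip pP _ _ 'p' t rfl (by decide), pvStrip pF _ _ 'f' t rfl (by decide),
      pvStrip pD _ _ 'd' t rfl (by decide), pvStrip pS _ _ 's' t rfl (by decide),
      pvStrip pN _ _ 'n' t rfl (by decide), pvStrip pO _ _ 'o' t rfl (by decide)]
    apply pvFindCongr pI
    rw [pvStrip pAcc _ _ 'a' t rfl (by decide)]
  · symm
    rw [pvStrip pA _ _ 'a' t rfl (fun e => h1 e.symm),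
      pvStrip pC _ _ 'c' t rfl (fun e => h2 e.symm),
      pvStrip pP _ _ 'p' t rfl (fun e => h3 e.symm),
      pvStrip pF _ _ 'f' t rfl (fun e => h4 e.symm),
      pvStrip pD _ _ 'd' t rfl (fun e => h5 e.symm),
      pvStrip pS _ _ 's' t rfl (fun e => h6 e.symm),
      pvStrip pN _ _ 'n' t rfl (fun e => h7 e.symm),
      pvStrip pO _ _ 'o' t rfl (fun e => h8 e.symm),
      pvStrip pI _ _ 'i' t rfl (fun e => h9 e.symm),
      pvStrip pAcc _ _ 'a' t rfl (fun e => h1 e.symm)]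

-- the fuel-bounded bucket scan computes exactly the full-dict scan
lemma pvScanGo_eq : ∀ (N : Nat) (s : List Char), s.length ≤ N → pvScanGo N s = pvScan s := by
  intro N
  induction N with
  | zero =>
    intro s hs
    have : s = [] := by cases s <;> simp_all
    subst this
    rw [pvScanGo, pvScan_nil]
  | succ N ih =>
    intro s hs
    cases s with
    | nil => rw [pvScanGo, pvScan_nil]
    | cons c t =>
      cases hf : pvPairs.find? (fun kv => kv.1.isPrefixOf (c :: t)) with
      | none =>
        have hb : (pvBucket c).find? (fun kv => kv.1.isPrefixOf (c :: t)) = none := by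
          rw [pvBucketFind, hf]
        rw [pvScanGo, hb]
        dsimp only
        rw [pvScan_cons hf, ih t (by simp at hs; omega)]
      | some kv =>
        have hb : (pvBucket c).find? (fun kv => kv.1.isPrefixOf (c :: t)) = some kv := by
          rw [pvBucketFind, hf]
        have hmem : kv ∈ pvPairs := List.mem_of_find?_eq_some hf
        obtain ⟨hk1, _⟩ := pv_keys_fact kv hmem
        have hpos : 0 < kv.1.length := List.length_pos_iff.mpr hk1
        have hdrop : (c :: t).drop kv.1.length = t.drop (kv.1.length - 1) := by
          cases hl : kv.1.length with
          | zero => exact absurd hl (by omega)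
          | succ n => simp [hl, List.drop_succ_cons]
        rw [pvScanGo, hb]
        dsimp only
        rw [pvScan_some hf, hdrop,
          ih (t.drop (kv.1.length - 1)) (by simp only [List.length_drop]; simp at hs; omega)]

lemma pvScanB_eq (s : List Char) : pvScanB s = pvScan s :=
  pvScanGo_eq s.length s le_rfl

-- B's recursive capitalize computes A's map-based one
lemma pvLowerTail_eq (l : List Char) : pvLowerTail l = l.map pvLowChar := by
  induction l with
  | nil => rfl
  | cons c t ih => simp [pvLowerTail, ih]

lemma pvCapB_eq (l : List Char) : pvCapB l = pvCapitalize l := by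
  cases l with
  | nil => rfl
  | cons c t => simp [pvCapB, pvCapitalize, pvLowerTail_eq]

lemma pvSlice147 (l : List Char) : PySem.Chars.slice l none (some 147) = l.take 147 := by
  simp [pysem]

-- ===== VERDICT (by name: the statement is the Claim_ definition above) =====
theorem simplify_message_py_spec : Claim_equal_simplify_message_py := by
  intro message hDom hPre
  unfold Spec_simplify_message_py
  obtain ⟨hp1, hp2⟩ := hPre
  have hb1 : ¬ pvPat1 <:+: PySem.Chars.lower message.toList := by
    intro hinf
    have h : PySem.Str.isIn "service failedisk full" (PySem.Str.lower message) = true := by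
      rw [PySem.Str.isIn_iff_infix, PySem.Str.toList_lower]
      exact hinf
    rw [h] at hp1
    cases hp1
  have hb2 : ¬ pvPat2 <:+: PySem.Chars.lower message.toList := by
    intro hinf
    have h : PySem.Str.isIn "access deniedisk full" (PySem.Str.lower message) = true := by
      rw [PySem.Str.isIn_iff_infix, PySem.Str.toList_lower]
      exact hinf
    rw [h] at hp2
    cases hp2
  have hmain : pvPairs.foldl (fun acc kv => PySem.Chars.replace acc kv.1 kv.2)
      (PySem.Chars.lower message.toList) = pvScan (PySem.Chars.lower message.toList) :=
    pvMain (PySem.Chars.lower message.toList).length _ le_rfl hb1 hb2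
  simp only [simplify_message_py, simplify_message_py_alt]
  rw [hmain, pvSlice147]
  rw [show pvScanB (PySem.Chars.lower message.toList) = pvScan (PySem.Chars.lower message.toList) from pvScanB_eq _]
  rw [pvCapB_eq]
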